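-- pv_equiv track=rewrite | github.com/HunterSTL/ProceduralCaveSimulation | CaveSimulation.py | get_wall_count
-- ===== SOURCE A (Python) =====
-- grid_height = 50
--
-- grid_width = 50
--
-- def get_wall_count(grid, x, y, search_range):
--     wall_count = 0
--     if search_range < 1:
--         start = -1
--         end = 2
--     else:
--         start = -1 - (search_range - 1)
--         end = 2 + (search_range - 1)
--     for dy in range(start, end):
--         for dx in range(start, end):
--             nx = x + dx
--             ny = y + dy
--             if nx < 0 or nx > grid_width - 1 or ny < 0 or ny > grid_height - 1:
--                 wall_count += 1
--             else:
--                 if (dx != 0 or dy != 0) and grid[ny][nx] == 1: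
--                     wall_count += 1
--     return wall_count
-- ===== SOURCE B (Python) =====
-- grid_height = 50
--
-- grid_width = 50
--
-- def get_wall_count(grid, x, y, search_range):
--     r = 1 if search_range < 1 else search_range
--     cx0, cx1 = max(0, x - r), min(grid_width, x + r + 1)
--     cy0, cy1 = max(0, y - r), min(grid_height, y + r + 1)
--     side = 2 * r + 1
--     wall_count = side * side - max(0, cx1 - cx0) * max(0, cy1 - cy0)
--     for ny in range(cy0, cy1):
--         for nx in range(cx0, cx1):
--             if (nx != x or ny != y) and grid[ny][nx] == 1:
--                 wall_count += 1
--     return wall_count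
-- ===== Notes on version B (the rewrite author's own statement) =====
-- stated objective: alternative
-- what changed: A scans the full (2r+1)x(2r+1) window testing every cell for being outside the fixed 50x50 grid; B computes the out-of-bounds cell count in closed form from the clamped sub-rectangle's area and then scans only that in-bounds sub-rectangle.
import Mathlib
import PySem

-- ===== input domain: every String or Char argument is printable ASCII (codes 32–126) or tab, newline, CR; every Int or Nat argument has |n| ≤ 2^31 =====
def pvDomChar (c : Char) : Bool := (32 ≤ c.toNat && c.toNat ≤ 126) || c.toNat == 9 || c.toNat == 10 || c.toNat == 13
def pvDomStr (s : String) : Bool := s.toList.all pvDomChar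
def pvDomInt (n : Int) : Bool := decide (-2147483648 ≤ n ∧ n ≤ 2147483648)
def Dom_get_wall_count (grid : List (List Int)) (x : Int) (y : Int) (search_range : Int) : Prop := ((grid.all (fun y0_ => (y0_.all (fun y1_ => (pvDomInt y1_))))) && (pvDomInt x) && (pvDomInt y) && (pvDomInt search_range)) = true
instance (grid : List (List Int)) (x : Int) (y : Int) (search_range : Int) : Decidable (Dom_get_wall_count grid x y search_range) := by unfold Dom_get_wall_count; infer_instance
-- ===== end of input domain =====

-- B replaces A's scan of the whole (2r+1)×(2r+1) window (testing every cell for being out of bounds)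
-- by closed-form arithmetic for the out-of-bounds cell count plus a scan of only the clamped in-bounds
-- sub-rectangle (objective: alternative decomposition; same exact return value).

-- ===== PORT A =====
def grid_height : Int := 50
def grid_width : Int := 50

def get_wall_count (grid : List (List Int)) (x : Int) (y : Int) (search_range : Int) : Int :=
  let wall_count : Int := 0
  let se : Int × Int :=
    if search_range < 1 then (-1, 2)
    else (-1 - (search_range - 1), 2 + (search_range - 1))
  (PySem.List.pyRange se.1 se.2 1).foldl (fun wall_count dy =>
    (PySem.List.pyRange se.1 se.2 1).foldl (fun wall_count dx =>
      let nx := x + dx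
      let ny := y + dy
      if nx < 0 ∨ nx > grid_width - 1 ∨ ny < 0 ∨ ny > grid_height - 1 then wall_count + 1
      else if (dx ≠ 0 ∨ dy ≠ 0) ∧ PySem.List.pyGetD (PySem.List.pyGetD grid ny []) nx 0 = 1 then
        wall_count + 1
      else wall_count) wall_count) wall_count

-- ===== PORT B =====
def get_wall_count_alt (grid : List (List Int)) (x : Int) (y : Int) (search_range : Int) : Int :=
  let r : Int := if search_range < 1 then 1 else search_range
  let cx0 := max 0 (x - r)
  let cx1 := min grid_width (x + r + 1)
  let cy0 := max 0 (y - r)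
  let cy1 := min grid_height (y + r + 1)
  let side := 2 * r + 1
  let wall_count := side * side - max 0 (cx1 - cx0) * max 0 (cy1 - cy0)
  (PySem.List.pyRange cy0 cy1 1).foldl (fun wall_count ny =>
    (PySem.List.pyRange cx0 cx1 1).foldl (fun wall_count nx =>
      if (nx ≠ x ∨ ny ≠ y) ∧ PySem.List.pyGetD (PySem.List.pyGetD grid ny []) nx 0 = 1 then
        wall_count + 1
      else wall_count) wall_count) wall_count

-- ===== PRECONDITION & SPEC =====
-- Pre_ excludes exactly the inputs on which Python A raises IndexError: some cell of the search window
-- that lies inside the fixed 50×50 bounds, other than the centre (x,y) itself, is beyond the end of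
-- grid or of its row (A never subscripts grid at the centre thanks to `and` short-circuiting).
def Pre_get_wall_count (grid : List (List Int)) (x : Int) (y : Int) (search_range : Int) : Prop :=
  ∀ ny ∈ PySem.List.pyRange (max 0 (y - (if search_range < 1 then 1 else search_range)))
                            (min 50 (y + (if search_range < 1 then 1 else search_range) + 1)) 1,
  ∀ nx ∈ PySem.List.pyRange (max 0 (x - (if search_range < 1 then 1 else search_range)))
                            (min 50 (x + (if search_range < 1 then 1 else search_range) + 1)) 1,
    ¬(nx = x ∧ ny = y) →
      ny < (grid.length : Int) ∧ nx < ((PySem.List.pyGetD grid ny []).length : Int)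
instance (grid : List (List Int)) (x : Int) (y : Int) (search_range : Int) : Decidable (Pre_get_wall_count grid x y search_range) := by unfold Pre_get_wall_count; infer_instance

def pvWitness_get_wall_count : List (List Int) × Int × Int × Int :=
  ([[0, 1, 0], [1, 0, 1], [0, 1, 0]], 1, 1, 1)

def Spec_get_wall_count (grid : List (List Int)) (x : Int) (y : Int) (search_range : Int) (out : Int) : Prop := out = get_wall_count_alt grid x y search_range
instance (grid : List (List Int)) (x : Int) (y : Int) (search_range : Int) (out : Int) : Decidable (Spec_get_wall_count grid x y search_range out) := by unfold Spec_get_wall_count; infer_instance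

-- ===== CLAIM (what is proved, stated in full; the proofs are below) =====
def Claim_equal_get_wall_count : Prop := ∀ (grid : List (List Int)) (x : Int) (y : Int) (search_range : Int), Dom_get_wall_count grid x y search_range → Pre_get_wall_count grid x y search_range → Spec_get_wall_count grid x y search_range (get_wall_count grid x y search_range)

-- ===== LEMMAS AND PROOFS =====

lemma sum_window (g : Int → Int) (a b lo hi c : Int) (hab : a ≤ b)
    (hout : ∀ t, a ≤ t → t < b → (t < lo ∨ hi ≤ t) → g t = c) :
    ((PySem.List.pyRange a b 1).map g).sum
      = ((b - a) - max 0 (min hi b - max lo a)) * c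
        + ((PySem.List.pyRange (max lo a) (min hi b) 1).map g).sum := by
  by_cases h : min hi b ≤ max lo a
  · rw [PySem.List.pyRange_one_eq_nil h]
    have hall : ∀ t ∈ PySem.List.pyRange a b 1, g t = c := by
      intro t ht
      rw [PySem.List.mem_pyRange_one] at ht
      exact hout t ht.1 ht.2 (by omega)
    rw [List.map_congr_left hall, PySem.List.sum_map_const_int, PySem.List.length_pyRange_one]
    have hc : ((b - a).toNat : Int) = (b - a) - max 0 (min hi b - max lo a) := by omega
    simp [hc]
  · rw [not_le] at h
    have h1 : a ≤ max lo a := le_max_right _ _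
    have h2 : max lo a ≤ b := by omega
    have h3 : max lo a ≤ min hi b := le_of_lt h
    have h4 : min hi b ≤ b := min_le_right _ _
    rw [PySem.List.pyRange_one_append a (max lo a) b h1 h2,
        PySem.List.pyRange_one_append (max lo a) (min hi b) b h3 h4,
        List.map_append, List.map_append, List.sum_append, List.sum_append]
    have hL : ∀ t ∈ PySem.List.pyRange a (max lo a) 1, g t = c := by
      intro t ht
      rw [PySem.List.mem_pyRange_one] at ht
      exact hout t ht.1 (by omega) (by omega)
    have hR : ∀ t ∈ PySem.List.pyRange (min hi b) b 1, g t = c := by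
      intro t ht
      rw [PySem.List.mem_pyRange_one] at ht
      exact hout t (by omega) ht.2 (by omega)
    rw [List.map_congr_left hL, List.map_congr_left hR,
        PySem.List.sum_map_const_int, PySem.List.sum_map_const_int,
        PySem.List.length_pyRange_one, PySem.List.length_pyRange_one]
    have hcoef : ((max lo a - a).toNat : Int) + ((b - min hi b).toNat : Int)
        = (b - a) - max 0 (min hi b - max lo a) := by omega
    linear_combination c * hcoef

lemma sum_shift (g : Int → Int) (a b x : Int) :
    ((PySem.List.pyRange a b 1).map (fun d => g (x + d))).sum
      = ((PySem.List.pyRange (x + a) (x + b) 1).map g).sum := by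
  rw [PySem.List.pyRange_one, PySem.List.pyRange_one, List.map_map, List.map_map]
  have hn : (x + b - (x + a)).toNat = (b - a).toNat := by omega
  rw [hn]
  refine congrArg List.sum (List.map_congr_left ?_)
  intro k _
  exact congrArg g (by ring)

lemma main_eq (grid : List (List Int)) (x y r : Int) (hr : 1 ≤ r) :
    (PySem.List.pyRange (-r) (r + 1) 1).foldl (fun wc dy =>
      (PySem.List.pyRange (-r) (r + 1) 1).foldl (fun wc dx =>
        if x + dx < 0 ∨ x + dx > 50 - 1 ∨ y + dy < 0 ∨ y + dy > 50 - 1 then wc + 1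
        else if (dx ≠ 0 ∨ dy ≠ 0) ∧ PySem.List.pyGetD (PySem.List.pyGetD grid (y + dy) []) (x + dx) 0 = 1 then wc + 1
        else wc) wc) 0
    = (PySem.List.pyRange (max 0 (y - r)) (min 50 (y + r + 1)) 1).foldl (fun wc ny =>
        (PySem.List.pyRange (max 0 (x - r)) (min 50 (x + r + 1)) 1).foldl (fun wc nx =>
          if (nx ≠ x ∨ ny ≠ y) ∧ PySem.List.pyGetD (PySem.List.pyGetD grid ny []) nx 0 = 1 then wc + 1
          else wc) wc)
        ((2 * r + 1) * (2 * r + 1)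
          - max 0 (min 50 (x + r + 1) - max 0 (x - r)) * max 0 (min 50 (y + r + 1) - max 0 (y - r))) := by
  set term : Int → Int → Int := fun nx ny =>
    if nx < 0 ∨ nx > 50 - 1 ∨ ny < 0 ∨ ny > 50 - 1 then 1
    else if (nx ≠ x ∨ ny ≠ y) ∧ PySem.List.pyGetD (PySem.List.pyGetD grid ny []) nx 0 = 1 then 1
    else 0 with hterm
  set bI : Int → Int → Int := fun nx ny =>
    if (nx ≠ x ∨ ny ≠ y) ∧ PySem.List.pyGetD (PySem.List.pyGetD grid ny []) nx 0 = 1 then 1 else 0 with hbI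
  -- Step 1: LHS to a double sum of `term` over offsets
  have hA : ∀ dy : Int, (fun (wc dx : Int) =>
        if x + dx < 0 ∨ x + dx > 50 - 1 ∨ y + dy < 0 ∨ y + dy > 50 - 1 then wc + 1
        else if (dx ≠ 0 ∨ dy ≠ 0) ∧ PySem.List.pyGetD (PySem.List.pyGetD grid (y + dy) []) (x + dx) 0 = 1 then wc + 1
        else wc)
      = fun wc dx => wc + term (x + dx) (y + dy) := by
    intro dy
    funext wc dx
    have hiff : ((x + dx ≠ x ∨ y + dy ≠ y)) = ((dx ≠ 0 ∨ dy ≠ 0)) := by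
      apply propext; omega
    simp only [hterm, hiff]
    split_ifs <;> ring
  have houter : (fun (wc dy : Int) => (PySem.List.pyRange (-r) (r + 1) 1).foldl (fun wc dx =>
        if x + dx < 0 ∨ x + dx > 50 - 1 ∨ y + dy < 0 ∨ y + dy > 50 - 1 then wc + 1
        else if (dx ≠ 0 ∨ dy ≠ 0) ∧ PySem.List.pyGetD (PySem.List.pyGetD grid (y + dy) []) (x + dx) 0 = 1 then wc + 1
        else wc) wc)
      = fun wc dy => wc + ((PySem.List.pyRange (-r) (r + 1) 1).map (fun dx => term (x + dx) (y + dy))).sum := by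
    funext wc dy
    rw [hA dy, PySem.List.foldl_add]
  rw [houter, PySem.List.foldl_add, zero_add]
  -- Step 2: shift both sums to absolute coordinates
  have hrow : ∀ dy : Int,
      ((PySem.List.pyRange (-r) (r + 1) 1).map (fun dx => term (x + dx) (y + dy))).sum
        = ((PySem.List.pyRange (x - r) (x + r + 1) 1).map (fun nx => term nx (y + dy))).sum := by
    intro dy
    rw [sum_shift (fun nx => term nx (y + dy)) (-r) (r + 1) x]
    have e1 : x + -r = x - r := by ring
    have e2 : x + (r + 1) = x + r + 1 := by ring
    rw [e1, e2]
  rw [List.map_congr_left (fun dy _ => hrow dy)]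
  rw [sum_shift (fun ny => ((PySem.List.pyRange (x - r) (x + r + 1) 1).map (fun nx => term nx ny)).sum) (-r) (r + 1) y]
  have e1 : y + -r = y - r := by ring
  have e2 : y + (r + 1) = y + r + 1 := by ring
  rw [e1, e2]
  -- Step 3: clamp the outer sum
  have hout : ∀ t, y - r ≤ t → t < y + r + 1 → (t < 0 ∨ 50 ≤ t) →
      ((PySem.List.pyRange (x - r) (x + r + 1) 1).map (fun nx => term nx t)).sum = 2 * r + 1 := by
    intro t _ _ hoob
    have hall : ∀ nx ∈ PySem.List.pyRange (x - r) (x + r + 1) 1, term nx t = 1 := by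
      intro nx _
      rw [hterm]
      exact if_pos (by omega)
    rw [List.map_congr_left hall, PySem.List.sum_map_const_int, PySem.List.length_pyRange_one]
    have : ((x + r + 1 - (x - r)).toNat : Int) = 2 * r + 1 := by omega
    rw [this, mul_one]
  rw [sum_window _ (y - r) (y + r + 1) 0 50 (2 * r + 1) (by omega) hout]
  -- Step 4: clamp each remaining row
  have hmid : ∀ ny ∈ PySem.List.pyRange (max 0 (y - r)) (min 50 (y + r + 1)) 1,
      ((PySem.List.pyRange (x - r) (x + r + 1) 1).map (fun nx => term nx ny)).sum
        = (2 * r + 1 - max 0 (min 50 (x + r + 1) - max 0 (x - r)))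
          + ((PySem.List.pyRange (max 0 (x - r)) (min 50 (x + r + 1)) 1).map (fun nx => bI nx ny)).sum := by
    intro ny hny
    rw [PySem.List.mem_pyRange_one] at hny
    have hout' : ∀ t, x - r ≤ t → t < x + r + 1 → (t < 0 ∨ 50 ≤ t) → term t ny = 1 := by
      intro t _ _ hoob
      rw [hterm]
      exact if_pos (by omega)
    rw [sum_window _ (x - r) (x + r + 1) 0 50 1 (by omega) hout']
    have hin : ∀ nx ∈ PySem.List.pyRange (max 0 (x - r)) (min 50 (x + r + 1)) 1,
        term nx ny = bI nx ny := by
      intro nx hnx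
      rw [PySem.List.mem_pyRange_one] at hnx
      rw [hterm, hbI]
      exact if_neg (by omega)
    rw [List.map_congr_left hin]
    have : (x + r + 1 - (x - r)) - max 0 (min 50 (x + r + 1) - max 0 (x - r))
        = 2 * r + 1 - max 0 (min 50 (x + r + 1) - max 0 (x - r)) := by ring
    rw [this, mul_one]
  rw [List.map_congr_left hmid]
  -- Step 5: split the constant out of the middle sum
  rw [PySem.List.sum_map_add_int _ (fun _ => 2 * r + 1 - max 0 (min 50 (x + r + 1) - max 0 (x - r)))
      (fun ny => ((PySem.List.pyRange (max 0 (x - r)) (min 50 (x + r + 1)) 1).map (fun nx => bI nx ny)).sum),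
    PySem.List.sum_map_const_int, PySem.List.length_pyRange_one]
  -- Step 6: RHS foldls to init + double sum of bI
  have hBo : (fun (wc ny : Int) => (PySem.List.pyRange (max 0 (x - r)) (min 50 (x + r + 1)) 1).foldl (fun wc nx =>
        if (nx ≠ x ∨ ny ≠ y) ∧ PySem.List.pyGetD (PySem.List.pyGetD grid ny []) nx 0 = 1 then wc + 1
        else wc) wc)
      = fun wc ny => wc + ((PySem.List.pyRange (max 0 (x - r)) (min 50 (x + r + 1)) 1).map (fun nx => bI nx ny)).sum := by
    funext wc ny
    have hB : (fun (wc nx : Int) =>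
          if (nx ≠ x ∨ ny ≠ y) ∧ PySem.List.pyGetD (PySem.List.pyGetD grid ny []) nx 0 = 1 then wc + 1
          else wc)
        = fun wc nx => wc + bI nx ny := by
      funext wc nx
      by_cases h : (nx ≠ x ∨ ny ≠ y) ∧ PySem.List.pyGetD (PySem.List.pyGetD grid ny []) nx 0 = 1 <;>
        simp [hbI, h]
    rw [hB, PySem.List.foldl_add]
  rw [hBo, PySem.List.foldl_add]
  -- Step 7: arithmetic
  have hih : (((min 50 (y + r + 1) - max 0 (y - r)).toNat : Int))
      = max 0 (min 50 (y + r + 1) - max 0 (y - r)) := by omega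
  rw [hih]
  ring

-- ===== VERDICT (by name: the statement is the Claim_ definition above) =====
theorem get_wall_count_spec : Claim_equal_get_wall_count := by
  intro grid x y sr _ _
  unfold Spec_get_wall_count
  by_cases h : sr < 1
  · have H := main_eq grid x y 1 (by norm_num)
    simp only [get_wall_count, get_wall_count_alt, grid_width, grid_height, if_pos h]
    exact H
  · have H := main_eq grid x y sr (by omega)
    simp only [get_wall_count, get_wall_count_alt, grid_width, grid_height, if_neg h]
    have e1 : (-1 : Int) - (sr - 1) = -sr := by ring
    have e2 : (2 : Int) + (sr - 1) = sr + 1 := by ring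
    rw [e1, e2]
    exact H
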